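-- pv_equiv track=rewrite | github.com/kevinniechen/tinyalign | aligners/naive.py | simple_align
-- ===== SOURCE A (Python) =====
-- def simple_align(read, reference):
--     best_pos = -1
--     best_score = -1
--
--     for i in range(len(reference) - len(read) + 1):
--         score = sum(1 for j in range(len(read)) if read[j] == reference[i+j])
--         if score > best_score:
--             best_score = score
--             best_pos = i
--
--     return best_pos, best_score
-- ===== SOURCE B (Python) =====
-- def simple_align(read, reference):
--     m, n = len(read), len(reference)
--     if n < m:
--         return -1, -1
--     width = n - m + 1
--     # score table over all offsets, built by loop interchange: read position j is
--     # compared against the contiguous reference window reference[j : j + width]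
--     scores = [0] * width
--     for j, c in enumerate(read):
--         window = reference[j:j + width]
--         scores = [s + (c == d) for s, d in zip(scores, window)]
--     best_pos, best_score = -1, -1
--     for i, s in enumerate(scores):
--         if s > best_score:
--             best_pos, best_score = i, s
--     return best_pos, best_score
-- ===== Notes on version B (the rewrite author's own statement) =====
-- stated objective: alternative
-- what changed: Interchanges the loops: instead of rescanning the whole read for each offset while keeping a running best, B builds the complete per-offset score table by adding, for each read position, a 0/1 match vector against a contiguous slice of the reference, then scans the table once for the first argmax.
import Mathlib
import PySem

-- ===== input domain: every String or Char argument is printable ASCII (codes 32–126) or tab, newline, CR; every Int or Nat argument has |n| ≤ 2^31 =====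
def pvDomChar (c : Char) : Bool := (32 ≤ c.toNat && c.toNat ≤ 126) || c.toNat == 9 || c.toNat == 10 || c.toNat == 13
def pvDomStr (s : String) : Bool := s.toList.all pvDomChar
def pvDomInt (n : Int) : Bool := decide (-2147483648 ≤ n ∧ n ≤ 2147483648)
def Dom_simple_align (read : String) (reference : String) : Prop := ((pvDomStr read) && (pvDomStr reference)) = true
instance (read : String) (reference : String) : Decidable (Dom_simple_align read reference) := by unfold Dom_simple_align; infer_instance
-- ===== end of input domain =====

-- B interchanges the loops: instead of rescanning the read per offset with a running best, it
-- builds the whole score table (one 0/1 match vector per read position, taken from a contiguous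
-- reference slice) and then scans it once for the first argmax; an alternative of the same cost.

-- ===== PORT A =====
def simple_align (read : String) (reference : String) : Int × Int :=
  let rd := read.toList
  let rf := reference.toList
  (PySem.List.pyRange 0 ((rf.length : Int) - (rd.length : Int) + 1) 1).foldl
    (fun st i =>
      let score : Int := ((List.range rd.length).map
        (fun j => if rd.getD j ' ' == PySem.List.pyGetD rf (i + (j : Int)) ' ' then (1 : Int) else 0)).sum
      if score > st.2 then (i, score) else st)
    (-1, -1)

-- ===== PORT B =====
def simple_align_alt (read : String) (reference : String) : Int × Int :=
  let rd := read.toList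
  let rf := reference.toList
  let m := rd.length
  let n := rf.length
  if n < m then (-1, -1) else
    let width := n - m + 1   -- n ≥ m here, so Nat subtraction is exact
    -- s + (c == d): Python's bool counts as 0/1
    let scores : List Int :=
      (PySem.List.enumerate rd).foldl (fun sc jc =>
        ((sc.zip (PySem.List.slice rf (some jc.1) (some (jc.1 + (width : Int))))).map
          (fun q => q.1 + if jc.2 == q.2 then (1 : Int) else 0)))
        (List.replicate width 0)
    (PySem.List.enumerate scores).foldl
      (fun st is => if is.2 > st.2 then (is.1, is.2) else st) (-1, -1)

-- ===== PRECONDITION & SPEC =====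
def Spec_simple_align (read : String) (reference : String) (out : Int × Int) : Prop := out = simple_align_alt read reference
instance (read : String) (reference : String) (out : Int × Int) : Decidable (Spec_simple_align read reference out) := by unfold Spec_simple_align; infer_instance

-- ===== CLAIM (what is proved, stated in full; the proofs are below) =====
def Claim_equal_simple_align : Prop := ∀ (read : String) (reference : String), Dom_simple_align read reference → Spec_simple_align read reference (simple_align read reference)

-- ===== LEMMAS AND PROOFS =====

-- one pass of B's table update: pointwise effect of adding one 0/1 match vector
theorem pv_step (rf : List Char) (sc : List Int) (c : Char) (s : Nat) (W : Int)
    (hW : (sc.length : Int) ≤ W) (hn : s + sc.length ≤ rf.length) :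
    ((sc.zip (PySem.List.slice rf (some (s : Int)) (some ((s : Int) + W)))).map
        (fun q => q.1 + if c == q.2 then (1 : Int) else 0)).length = sc.length
    ∧ ∀ i, i < sc.length →
      ((sc.zip (PySem.List.slice rf (some (s : Int)) (some ((s : Int) + W)))).map
          (fun q => q.1 + if c == q.2 then (1 : Int) else 0)).getD i 0
        = sc.getD i 0 + (if c == rf.getD (s + i) ' ' then (1 : Int) else 0) := by
  have h0W : (0:Int) ≤ W := le_trans (by positivity) hW
  have hsl : PySem.List.slice rf (some (s : Int)) (some ((s : Int) + W))
      = (rf.drop s).take W.toNat := by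
    rw [PySem.List.slice_toNat rf (by positivity) (by omega)]
    simp only [Int.toNat_natCast]
    congr 1
    omega
  have hwlen : ((rf.drop s).take W.toNat).length = min W.toNat (rf.length - s) := by
    simp
  have hlen : ((sc.zip ((rf.drop s).take W.toNat)).map
      (fun q => q.1 + if c == q.2 then (1 : Int) else 0)).length = sc.length := by
    rw [List.length_map, List.length_zip, hwlen]
    omega
  rw [hsl]
  refine ⟨hlen, ?_⟩
  intro i hi
  have hiz : i < (sc.zip ((rf.drop s).take W.toNat)).length := by
    rw [List.length_zip, hwlen]; omega
  rw [List.getD_eq_getElem _ _ (by rwa [hlen]), List.getD_eq_getElem _ _ hi,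
    List.getD_eq_getElem _ _ (by omega : s + i < rf.length)]
  rw [List.getElem_map, List.getElem_zip]
  congr 2
  rw [List.getElem_take, List.getElem_drop]

-- B's table-building fold, characterized pointwise
theorem pv_fold (rf : List Char) (rd' : List Char) (W : Int) : ∀ (s : Nat) (sc : List Int),
    (sc.length : Int) ≤ W → s + rd'.length + sc.length ≤ rf.length + 1 →
    (List.foldl (fun sc2 jc =>
        ((sc2.zip (PySem.List.slice rf (some jc.1) (some (jc.1 + W)))).map
          (fun q => q.1 + if jc.2 == q.2 then (1 : Int) else 0))) sc
        (PySem.List.enumerate rd' (s : Int))).length = sc.length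
    ∧ ∀ i, i < sc.length →
      (List.foldl (fun sc2 jc =>
          ((sc2.zip (PySem.List.slice rf (some jc.1) (some (jc.1 + W)))).map
            (fun q => q.1 + if jc.2 == q.2 then (1 : Int) else 0))) sc
          (PySem.List.enumerate rd' (s : Int))).getD i 0
        = sc.getD i 0 + ((List.range rd'.length).map
            (fun t => if rd'.getD t ' ' == rf.getD (s + i + t) ' ' then (1 : Int) else 0)).sum := by
  induction rd' with
  | nil =>
    intro s sc _ _
    refine ⟨by simp [PySem.List.enumerate], ?_⟩
    intro i _
    simp [PySem.List.enumerate]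
  | cons c tl ih =>
    intro s sc hW hb
    rw [PySem.List.enumerate_cons, List.foldl_cons]
    have hstep := pv_step rf sc c s W hW (by simp only [List.length_cons] at hb; omega)
    set sc1 := ((sc.zip (PySem.List.slice rf (some (s : Int)) (some ((s : Int) + W)))).map
        (fun q => q.1 + if c == q.2 then (1 : Int) else 0)) with hsc1
    have hcast : ((s : Int) + 1) = ((s + 1 : Nat) : Int) := by push_cast; ring
    have hih := ih (s + 1) sc1 (by rw [hstep.1]; exact hW) (by rw [hstep.1]; simp at hb ⊢; omega)
    rw [hcast]
    constructor
    · rw [hih.1, hstep.1]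
    · intro i hi
      rw [hih.2 i (by rw [hstep.1]; exact hi), hstep.2 i hi]
      rw [List.length_cons, List.range_succ_eq_map, List.map_cons, List.sum_cons, List.map_map]
      simp only [List.getD_cons_zero, Nat.add_zero, Function.comp_def, List.getD_cons_succ]
      have : ∀ t : Nat, s + 1 + i + t = s + i + (t + 1) := by omega
      simp only [this]
      ring

-- B's finished table agrees with A's per-offset score
theorem pv_scores_eq (rd rf : List Char) (hmn : rd.length ≤ rf.length) (i : Int)
    (h0 : 0 ≤ i) (hK : i ≤ (rf.length : Int) - (rd.length : Int)) :
    (List.foldl (fun sc jc =>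
        ((sc.zip (PySem.List.slice rf (some jc.1) (some (jc.1 + ((rf.length - rd.length + 1 : Nat) : Int))))).map
          (fun q => q.1 + if jc.2 == q.2 then (1 : Int) else 0)))
        (List.replicate (rf.length - rd.length + 1) 0)
        (PySem.List.enumerate rd)).getD i.toNat 0
      = ((List.range rd.length).map
          (fun j => if rd.getD j ' ' == PySem.List.pyGetD rf (i + (j : Int)) ' ' then (1 : Int) else 0)).sum := by
  have hfold := pv_fold rf rd ((rf.length - rd.length + 1 : Nat) : Int) 0
    (List.replicate (rf.length - rd.length + 1) 0)
    (by simp) (by simp; omega)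
  simp only [Nat.cast_zero] at hfold
  rw [hfold.2 i.toNat (by simp; omega)]
  rw [List.getD_eq_getElem _ _ (by simp; omega), List.getElem_replicate, zero_add]
  congr 1
  apply List.map_congr_left
  intro j hj
  simp only [List.mem_range] at hj
  have hz : 0 + i.toNat + j = i.toNat + j := by omega
  rw [hz]
  have hb1 : (0:Int) ≤ i + (j : Int) := by omega
  have hb2 : i + (j : Int) < (rf.length : Int) := by omega
  rw [PySem.List.pyGetD_eq_getElem rf ' ' hb1 hb2,
    List.getD_eq_getElem rf ' ' (n := i.toNat + j) (by omega)]
  have : (i + (j : Int)).toNat = i.toNat + j := by omega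
  simp only [this]

-- ===== VERDICT (by name: the statement is the Claim_ definition above) =====
theorem simple_align_spec : Claim_equal_simple_align := by
  intro read reference _
  unfold Spec_simple_align
  simp only [simple_align, simple_align_alt]
  by_cases hlt : reference.toList.length < read.toList.length
  · rw [if_pos hlt, PySem.List.pyRange_one_eq_nil (by omega)]
    rfl
  · rw [if_neg hlt]
    have hmn : read.toList.length ≤ reference.toList.length := by omega
    set scores := (List.foldl (fun sc jc =>
        ((sc.zip (PySem.List.slice reference.toList (some jc.1)
            (some (jc.1 + ((reference.toList.length - read.toList.length + 1 : Nat) : Int))))).map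
          (fun q => q.1 + if jc.2 == q.2 then (1 : Int) else 0)))
        (List.replicate (reference.toList.length - read.toList.length + 1) 0)
        (PySem.List.enumerate read.toList)) with hscores
    have hf := pv_fold reference.toList read.toList
        ((reference.toList.length - read.toList.length + 1 : Nat) : Int) 0
        (List.replicate (reference.toList.length - read.toList.length + 1) 0)
        (by simp only [List.length_replicate]; omega)
        (by simp only [List.length_replicate]; omega)
    simp only [Nat.cast_zero] at hf
    have hlen : (PySem.List.len scores : Int)
        = (reference.toList.length : Int) - (read.toList.length : Int) + 1 := by
      rw [PySem.List.len_eq, hscores, hf.1]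
      simp only [List.length_replicate]
      push_cast [Nat.sub_add_cancel]
      omega
    rw [PySem.List.enumerate_eq_map_pyRange scores 0, List.foldl_map, hlen]
    apply PySem.List.foldl_congr_mem
    intro acc i hi
    rw [PySem.List.mem_pyRange_one] at hi
    dsimp only
    have hsc : PySem.List.pyGetD scores i 0 = scores.getD i.toNat 0 := by
      rw [PySem.List.pyGetD_eq_getElem scores 0 hi.1 (by rw [← PySem.List.len_eq, hlen]; omega),
        List.getD_eq_getElem scores 0 (n := i.toNat)
          (by have := hlen; rw [PySem.List.len_eq] at this; omega)]
    rw [hsc, hscores]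
    rw [pv_scores_eq read.toList reference.toList hmn i hi.1 (by omega)]
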